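-- pv_equiv track=rewrite | github.com/cambridge-cares/TheWorldAvatar | MARIE_AND_BERT/Evaluation/Evaluator.py | hit_k_rate
-- ===== SOURCE A (Python) =====
-- def hit_k_rate(true_answer, pred_answers):
--     scores = []
--     k_list = [1, 5, 10]
--     for k in k_list:
--         top_k_answers = pred_answers[0: min(k, len(pred_answers)) + 1]
--         if true_answer in top_k_answers:
--             scores.append(1)
--         else:
--             scores.append(0)
--     return scores
-- ===== SOURCE B (Python) =====
-- def hit_k_rate(true_answer, pred_answers):
--     found = None
--     for i, ans in enumerate(pred_answers):
--         if ans == true_answer: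
--             found = i
--             break
--     return [1 if found is not None and found <= k else 0 for k in (1, 5, 10)]
-- ===== Notes on version B (the rewrite author's own statement) =====
-- stated objective: alternative
-- what changed: B scans pred_answers once for the first index of true_answer (early break) and derives all three hit@k scores from that single index, instead of building and membership-scanning a slice for each k.
import Mathlib
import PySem

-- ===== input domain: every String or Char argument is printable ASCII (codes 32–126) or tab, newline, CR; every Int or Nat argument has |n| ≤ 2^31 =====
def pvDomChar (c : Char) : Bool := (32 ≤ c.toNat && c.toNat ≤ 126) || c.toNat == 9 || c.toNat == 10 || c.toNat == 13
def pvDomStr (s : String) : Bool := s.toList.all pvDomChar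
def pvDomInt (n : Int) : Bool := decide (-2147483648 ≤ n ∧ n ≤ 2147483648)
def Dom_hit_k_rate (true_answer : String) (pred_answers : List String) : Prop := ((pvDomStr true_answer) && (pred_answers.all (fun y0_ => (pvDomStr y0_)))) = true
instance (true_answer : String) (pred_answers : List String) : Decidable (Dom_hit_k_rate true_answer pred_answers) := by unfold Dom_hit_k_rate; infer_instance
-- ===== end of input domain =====

-- B computes the first index of true_answer in one scan and reads all three hit@k scores
-- off that index, replacing A's three slice-and-scan passes (objective: alternative decomposition).


-- ===== PORT A =====
-- for k in [1,5,10]: slice pred_answers[0 : min(k,len)+1], append 1/0 on membership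
def hit_k_rate (true_answer : String) (pred_answers : List String) : List Int :=
  ([1, 5, 10] : List Int).foldl
    (fun scores k =>
      let top_k_answers :=
        PySem.List.slice pred_answers (some 0) (some (min k (pred_answers.length : Int) + 1))
      if true_answer ∈ top_k_answers then scores ++ [1] else scores ++ [0])
    []

-- ===== PORT B =====
-- the enumerate-with-break loop: first index where the answer matches, else none
def pvFindFirst (true_answer : String) : List String → Nat → Option Nat
  | [], _ => none
  | ans :: rest, i => if ans == true_answer then some i else pvFindFirst true_answer rest (i + 1)

def hit_k_rate_alt (true_answer : String) (pred_answers : List String) : List Int :=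
  let found := pvFindFirst true_answer pred_answers 0
  ([1, 5, 10] : List Int).map
    (fun k => if (match found with | some i => decide ((i : Int) ≤ k) | none => false) then 1 else 0)

-- ===== PRECONDITION & SPEC =====
def Spec_hit_k_rate (true_answer : String) (pred_answers : List String) (out : List Int) : Prop := out = hit_k_rate_alt true_answer pred_answers
instance (true_answer : String) (pred_answers : List String) (out : List Int) : Decidable (Spec_hit_k_rate true_answer pred_answers out) := by unfold Spec_hit_k_rate; infer_instance

-- ===== CLAIM (what is proved, stated in full; the proofs are below) =====
def Claim_equal_hit_k_rate : Prop := ∀ (true_answer : String) (pred_answers : List String), Dom_hit_k_rate true_answer pred_answers → Spec_hit_k_rate true_answer pred_answers (hit_k_rate true_answer pred_answers)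

-- ===== LEMMAS AND PROOFS =====

theorem pvFindFirst_le {t : String} {ps : List String} {i j : Nat}
    (h : pvFindFirst t ps i = some j) : i ≤ j ∧ j < i + ps.length := by
  induction ps generalizing i with
  | nil => simp [pvFindFirst] at h
  | cons a rest ih =>
    simp only [pvFindFirst] at h
    split at h
    · injection h with h; subst h; simp only [List.length_cons]; omega
    · have := ih h; simp only [List.length_cons]; omega

theorem mem_take_iff_pvFindFirst (t : String) (ps : List String) (n i : Nat) :
    t ∈ ps.take n ↔ ∃ j, pvFindFirst t ps i = some j ∧ j < i + n := by
  induction ps generalizing i n with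
  | nil => simp [pvFindFirst]
  | cons a rest ih =>
    cases n with
    | zero =>
      simp only [List.take_zero, List.not_mem_nil, false_iff]
      rintro ⟨j, hj, hlt⟩
      obtain ⟨ha, hb⟩ := pvFindFirst_le hj
      omega
    | succ m =>
      simp only [List.take_succ_cons, List.mem_cons, pvFindFirst]
      by_cases hat : a == t
      · have : t = a := ((beq_iff_eq).mp hat).symm
        simp only [hat, if_pos]
        constructor
        · intro _; exact ⟨i, rfl, by omega⟩
        · intro _; left; exact this
      · have hne : t ≠ a := fun h => hat (beq_iff_eq.mpr h.symm)
        simp only [hat]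
        rw [if_neg (by simp_all)]
        constructor
        · rintro (h | h)
          · exact absurd h hne
          · obtain ⟨j, hj, hlt⟩ := (ih m (i + 1)).mp h
            exact ⟨j, hj, by omega⟩
        · rintro ⟨j, hj, hlt⟩
          right
          refine (ih m (i + 1)).mpr ⟨j, hj, ?_⟩
          have := pvFindFirst_le hj; omega

theorem pv_score_eq (t : String) (ps : List String) (k : Int) (hk : 0 ≤ k) :
    (t ∈ PySem.List.slice ps (some 0) (some (min k (ps.length : Int) + 1)))
      ↔ (match pvFindFirst t ps 0 with | some i => ((i : Int) ≤ k) | none => False) := by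
  have hb : (0 : Int) ≤ min k (ps.length : Int) + 1 := by omega
  rw [PySem.List.slice_zero_start, PySem.List.slice_to ps hb]
  have htn : (min k (ps.length : Int) + 1).toNat = min k.toNat ps.length + 1 := by omega
  rw [htn, mem_take_iff_pvFindFirst t ps (min k.toNat ps.length + 1) 0]
  cases hFF : pvFindFirst t ps 0 with
  | none => simp
  | some j =>
    obtain ⟨_, hlen⟩ := pvFindFirst_le hFF
    simp only [Option.some.injEq]
    constructor
    · rintro ⟨j', hj', hlt⟩; cases hj'; omega
    · intro h; exact ⟨j, rfl, by omega⟩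

theorem hit_k_rate_spec : Claim_equal_hit_k_rate := by
  intro t ps _
  show hit_k_rate t ps = hit_k_rate_alt t ps
  unfold hit_k_rate hit_k_rate_alt
  simp only [List.foldl, List.map, List.nil_append]
  have h1 := pv_score_eq t ps 1 (by norm_num)
  have h5 := pv_score_eq t ps 5 (by norm_num)
  have h10 := pv_score_eq t ps 10 (by norm_num)
  cases hFF : pvFindFirst t ps 0 with
  | none =>
    rw [hFF] at h1 h5 h10
    simp only [h1, h5, h10]
    simp
  | some j =>
    rw [hFF] at h1 h5 h10
    simp only [h1, h5, h10, decide_eq_true_eq]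
    split_ifs <;> rfl
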